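-- pv_equiv track=rewrite | github.com/InternityFoundation/DS-A_SachinHegde | problems/tom an djerry.py | tom_jerry
-- ===== SOURCE A (Python) =====
-- def tom_jerry(tom):
--     jerry=[]
--     res=0
--     j=1
--     while(j<=tom):
--         temp=tom
--         if(j%2==0 and temp%2==0):
--             jtemp=j
--             jtemp=jtemp//2
--             temp=temp//2
--             while(jtemp>0):
--                 if(temp%2!=0 and jtemp%2==0):
--                     jerry.append(jtemp)
--                     break
--                 elif(temp%2==0 and jtemp%2==0):
--                     jtemp=jtemp//2
--                     temp=temp//2
--                 else:
--                     break
--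
--         elif(temp%2!=0 and j%2==0):
--             jerry.append(j)
--
--         j+=1
--
--     res=(len(jerry))
--     return res
-- ===== SOURCE B (Python) =====
-- def tom_jerry(tom):
--     if tom <= 0:
--         return 0
--     d = 2
--     while tom % d == 0:
--         d *= 2
--     return tom // d
-- ===== Notes on version B (the rewrite author's own statement) =====
-- stated objective: faster
-- what changed: Replaces the double loop over all j in 1..tom (inner halving scan per even j) by a closed form: A counts exactly the multiples of 2^(v2(tom)+1) in 1..tom, so B computes d = the smallest power of two not dividing tom and returns tom // d.
import Mathlib
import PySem

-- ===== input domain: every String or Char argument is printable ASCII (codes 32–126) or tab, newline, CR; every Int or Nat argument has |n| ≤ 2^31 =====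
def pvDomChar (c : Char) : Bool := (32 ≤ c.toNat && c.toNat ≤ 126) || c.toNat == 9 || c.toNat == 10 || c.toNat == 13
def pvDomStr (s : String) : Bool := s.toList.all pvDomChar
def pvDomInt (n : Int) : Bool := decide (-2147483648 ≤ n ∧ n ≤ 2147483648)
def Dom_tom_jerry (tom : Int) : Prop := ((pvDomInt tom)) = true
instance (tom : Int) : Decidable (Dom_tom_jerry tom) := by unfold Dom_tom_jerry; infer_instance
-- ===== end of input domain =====

-- B replaces A's scan of every j in 1..tom (with an inner halving loop) by the closed form
-- tom // d where d is the smallest power of two not dividing tom (objective: faster).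

-- ===== PORT A =====
-- inner 'while(jtemp>0)' loop of A; fuel = initial jtemp.toNat is enough since jtemp halves
def pvInnerA (fuel : Nat) (jtemp temp : Int) (jerry : List Int) : List Int :=
  match fuel with
  | 0 => jerry
  | f+1 =>
    if jtemp > 0 then
      if PySem.Int.mod temp 2 ≠ 0 ∧ PySem.Int.mod jtemp 2 = 0 then
        jerry ++ [jtemp]
      else if PySem.Int.mod temp 2 = 0 ∧ PySem.Int.mod jtemp 2 = 0 then
        pvInnerA f (PySem.Int.floordiv jtemp 2) (PySem.Int.floordiv temp 2) jerry
      else jerry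
    else jerry

-- outer 'while(j<=tom)' loop of A; fuel = tom.toNat runs j = 1..tom exactly
def pvOuterA (fuel : Nat) (j tom : Int) (jerry : List Int) : List Int :=
  match fuel with
  | 0 => jerry
  | f+1 =>
    if j ≤ tom then
      let temp := tom
      let jerry' :=
        if PySem.Int.mod j 2 = 0 ∧ PySem.Int.mod temp 2 = 0 then
          pvInnerA (PySem.Int.floordiv j 2).toNat
            (PySem.Int.floordiv j 2) (PySem.Int.floordiv temp 2) jerry
        else if PySem.Int.mod temp 2 ≠ 0 ∧ PySem.Int.mod j 2 = 0 then
          jerry ++ [j]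
        else jerry
      pvOuterA f (j+1) tom jerry'
    else jerry

def tom_jerry (tom : Int) : Int :=
  ((pvOuterA tom.toNat 1 tom []).length : Int)

-- ===== PORT B =====
-- 'while tom % d == 0: d *= 2'; fuel = tom.toNat is enough since d exceeds tom in log steps
def pvFindD (fuel : Nat) (tom d : Int) : Int :=
  match fuel with
  | 0 => d
  | f+1 => if PySem.Int.mod tom d = 0 then pvFindD f tom (d*2) else d

def tom_jerry_alt (tom : Int) : Int :=
  if tom ≤ 0 then 0
  else PySem.Int.floordiv tom (pvFindD tom.toNat tom 2)

-- ===== PRECONDITION & SPEC =====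
def Spec_tom_jerry (tom : Int) (out : Int) : Prop := out = tom_jerry_alt tom
instance (tom : Int) (out : Int) : Decidable (Spec_tom_jerry tom out) := by unfold Spec_tom_jerry; infer_instance

-- ===== CLAIM (what is proved, stated in full; the proofs are below) =====
def Claim_equal_tom_jerry : Prop := ∀ (tom : Int), Dom_tom_jerry tom → Spec_tom_jerry tom (tom_jerry tom)

-- ===== LEMMAS AND PROOFS =====

-- count of m in [j, j+fuel) with d ∣ m and m ≤ tom (proof-side helper)
def pvCnt (d tom : Int) : Nat → Int → Nat
  | 0, _ => 0
  | f+1, j => (if d ∣ j ∧ j ≤ tom then 1 else 0) + pvCnt d tom f (j+1)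

lemma pvCnt_of_gt (d tom : Int) : ∀ (f : Nat) (j : Int), tom < j → pvCnt d tom f j = 0 := by
  intro f
  induction f with
  | zero => intro j _; rfl
  | succ f ih =>
    intro j hj
    show (if d ∣ j ∧ j ≤ tom then 1 else 0) + pvCnt d tom f (j+1) = 0
    rw [ih (j+1) (by omega), if_neg (by rintro ⟨-, h⟩; omega)]

-- the inner loop appends exactly one element iff 2^(k+1) divides jtemp, where 2^k ∥ temp
lemma pvInnerA_len : ∀ (fuel : Nat) (a b : Int) (jerry : List Int) (k : Nat),
    1 ≤ a → 1 ≤ b → a < 2^fuel → ((2:Int)^k ∣ b) → ¬ ((2:Int)^(k+1) ∣ b) →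
    (pvInnerA fuel a b jerry).length
      = jerry.length + (if (2:Int)^(k+1) ∣ a then 1 else 0) := by
  intro fuel
  induction fuel with
  | zero =>
    intro a b jerry k ha _ hlt _ _
    norm_num at hlt; omega
  | succ f ih =>
    intro a b jerry k ha hb hlt hk hk1
    have ha0 : a > 0 := by omega
    rcases Nat.eq_zero_or_pos k with hk0 | hkpos
    · -- b odd
      subst hk0
      have hbodd : ¬ (2:Int) ∣ b := by simpa using hk1
      have hbm : PySem.Int.mod b 2 ≠ 0 :=
        fun h => hbodd ((PySem.Int.mod_eq_zero_iff_dvd b 2).mp h)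
      by_cases hae : (2:Int) ∣ a
      · have ham : PySem.Int.mod a 2 = 0 := (PySem.Int.mod_eq_zero_iff_dvd a 2).mpr hae
        have hd : (2:Int)^(0+1) ∣ a := by simpa using hae
        simp only [pvInnerA]
        rw [if_pos ha0, if_pos ⟨hbm, ham⟩, if_pos hd]
        simp
      · have ham : PySem.Int.mod a 2 ≠ 0 :=
          fun h => hae ((PySem.Int.mod_eq_zero_iff_dvd a 2).mp h)
        have hd : ¬ (2:Int)^(0+1) ∣ a := by simpa using hae
        simp only [pvInnerA]
        rw [if_pos ha0, if_neg (by rintro ⟨-, h⟩; exact ham h),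
            if_neg (by rintro ⟨-, h⟩; exact ham h), if_neg hd]
        simp
    · -- b even
      obtain ⟨k', rfl⟩ : ∃ k', k = k' + 1 := ⟨k - 1, by omega⟩
      have hbe : (2:Int) ∣ b := dvd_trans (dvd_pow_self 2 (by omega)) hk
      have hbm : PySem.Int.mod b 2 = 0 := (PySem.Int.mod_eq_zero_iff_dvd b 2).mpr hbe
      obtain ⟨c, rfl⟩ := hbe
      have hbm2 : PySem.Int.mod (2*c) 2 = 0 :=
        (PySem.Int.mod_eq_zero_iff_dvd (2*c) 2).mpr ⟨c, rfl⟩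
      have hdivb : PySem.Int.floordiv (2*c) 2 = c := by
        rw [PySem.Int.floordiv_eq_ediv_of_pos (by norm_num)]
        omega
      by_cases hae : (2:Int) ∣ a
      · obtain ⟨e, rfl⟩ := hae
        have ham : PySem.Int.mod (2*e) 2 = 0 :=
          (PySem.Int.mod_eq_zero_iff_dvd (2*e) 2).mpr ⟨e, rfl⟩
        have hdiva : PySem.Int.floordiv (2*e) 2 = e := by
          rw [PySem.Int.floordiv_eq_ediv_of_pos (by norm_num)]
          omega
        have he1 : 1 ≤ e := by omega
        have hc1 : 1 ≤ c := by omega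
        have helt : e < 2^f := by
          have : (2:Int)^(f+1) = 2 * 2^f := by ring
          omega
        have hck : (2:Int)^k' ∣ c := by
          have := hk
          rw [pow_succ'] at this
          exact (mul_dvd_mul_iff_left (two_ne_zero)).mp this
        have hck1 : ¬ (2:Int)^(k'+1) ∣ c := by
          intro h
          exact hk1 (by rw [pow_succ']; exact mul_dvd_mul_left 2 h)
        have hstep := ih e c jerry k' he1 hc1 helt hck hck1
        have hiff : ((2:Int)^(k'+1+1) ∣ 2*e) ↔ ((2:Int)^(k'+1) ∣ e) := by
          rw [pow_succ']
          exact mul_dvd_mul_iff_left (two_ne_zero)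
        simp only [pvInnerA]
        rw [if_pos (show (2:Int)*e > 0 by omega),
            if_neg (by rintro ⟨h, -⟩; exact h hbm2),
            if_pos ⟨hbm2, ham⟩, hdiva, hdivb, hstep]
        by_cases h : (2:Int)^(k'+1) ∣ e
        · rw [if_pos h, if_pos (hiff.mpr h)]
        · rw [if_neg h, if_neg (fun hc => h (hiff.mp hc))]
      · have ham : PySem.Int.mod a 2 ≠ 0 :=
          fun h => hae ((PySem.Int.mod_eq_zero_iff_dvd a 2).mp h)
        have hnd : ¬ ((2:Int)^(k'+1+1) ∣ a) := by
          intro h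
          exact hae (dvd_trans (dvd_pow_self 2 (by omega)) h)
        simp only [pvInnerA]
        rw [if_pos ha0, if_neg (by rintro ⟨-, h⟩; exact ham h),
            if_neg (by rintro ⟨-, h⟩; exact ham h), if_neg hnd]
        simp

-- the outer loop counts exactly the multiples of 2^(k+1) among j..tom, where 2^k ∥ tom
lemma pvOuterA_len (tom : Int) (k : Nat) (htom : 1 ≤ tom)
    (hk : (2:Int)^k ∣ tom) (hk1 : ¬ ((2:Int)^(k+1) ∣ tom)) :
    ∀ (fuel : Nat) (j : Int) (jerry : List Int), 1 ≤ j →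
    (pvOuterA fuel j tom jerry).length = jerry.length + pvCnt ((2:Int)^(k+1)) tom fuel j := by
  intro fuel
  induction fuel with
  | zero => intro j jerry _; rfl
  | succ f ih =>
    intro j jerry hj
    by_cases hle : j ≤ tom
    · have hone : (pvOuterA (f+1) j tom jerry)
          = pvOuterA f (j+1) tom
              (if PySem.Int.mod j 2 = 0 ∧ PySem.Int.mod tom 2 = 0 then
                pvInnerA (PySem.Int.floordiv j 2).toNat
                  (PySem.Int.floordiv j 2) (PySem.Int.floordiv tom 2) jerry
              else if PySem.Int.mod tom 2 ≠ 0 ∧ PySem.Int.mod j 2 = 0 then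
                jerry ++ [j]
              else jerry) := by
        simp [pvOuterA, hle]
      rw [hone, ih (j+1) _ (by omega)]
      have hcnt : pvCnt ((2:Int)^(k+1)) tom (f+1) j
          = (if (2:Int)^(k+1) ∣ j ∧ j ≤ tom then 1 else 0)
            + pvCnt ((2:Int)^(k+1)) tom f (j+1) := rfl
      rw [hcnt]
      -- it remains to show the updated jerry's length adds the right indicator
      have key : (if PySem.Int.mod j 2 = 0 ∧ PySem.Int.mod tom 2 = 0 then
                pvInnerA (PySem.Int.floordiv j 2).toNat
                  (PySem.Int.floordiv j 2) (PySem.Int.floordiv tom 2) jerry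
              else if PySem.Int.mod tom 2 ≠ 0 ∧ PySem.Int.mod j 2 = 0 then
                jerry ++ [j]
              else jerry).length
          = jerry.length + (if (2:Int)^(k+1) ∣ j ∧ j ≤ tom then 1 else 0) := by
        by_cases hje : (2:Int) ∣ j
        · have hjm : PySem.Int.mod j 2 = 0 := by
            rw [PySem.Int.mod_eq_zero_iff_dvd]; exact hje
          by_cases hte : (2:Int) ∣ tom
          · -- both even: the inner loop runs
            have htm : PySem.Int.mod tom 2 = 0 := (PySem.Int.mod_eq_zero_iff_dvd tom 2).mpr hte
            obtain ⟨e, rfl⟩ := hje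
            obtain ⟨c, rfl⟩ := hte
            have hdivj : PySem.Int.floordiv (2*e) 2 = e := by
              rw [PySem.Int.floordiv_eq_ediv_of_pos (by norm_num)]; omega
            have hdivt : PySem.Int.floordiv (2*c) 2 = c := by
              rw [PySem.Int.floordiv_eq_ediv_of_pos (by norm_num)]; omega
            obtain ⟨k', rfl⟩ : ∃ k', k = k' + 1 := by
              refine ⟨k - 1, ?_⟩
              rcases Nat.eq_zero_or_pos k with h0 | _
              · exfalso; apply hk1; subst h0; rw [pow_one]; exact ⟨c, rfl⟩
              · omega
            have he1 : 1 ≤ e := by omega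
            have hc1 : 1 ≤ c := by omega
            have helt : e < 2^(e.toNat) := by
              have h1 : e = ((e.toNat : Nat) : Int) := by omega
              have h2 : e.toNat < 2^(e.toNat) := Nat.lt_two_pow_self
              calc e = ((e.toNat : Nat) : Int) := h1
                _ < ((2^(e.toNat) : Nat) : Int) := by exact_mod_cast h2
                _ = (2:Int)^(e.toNat) := by push_cast; ring
            have hck : (2:Int)^k' ∣ c := by
              have := hk; rw [pow_succ'] at this
              exact (mul_dvd_mul_iff_left (two_ne_zero)).mp this
            have hck1 : ¬ (2:Int)^(k'+1) ∣ c := by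
              intro h; exact hk1 (by rw [pow_succ']; exact mul_dvd_mul_left 2 h)
            have hiff : ((2:Int)^(k'+1+1) ∣ 2*e) ↔ ((2:Int)^(k'+1) ∣ e) := by
              rw [pow_succ']; exact mul_dvd_mul_iff_left (two_ne_zero)
            rw [if_pos ⟨hjm, htm⟩, hdivj, hdivt]
            rw [pvInnerA_len e.toNat e c jerry k' he1 hc1 helt hck hck1]
            by_cases h : (2:Int)^(k'+1) ∣ e
            · rw [if_pos h, if_pos ⟨hiff.mpr h, hle⟩]
            · rw [if_neg h, if_neg (by rintro ⟨hc, -⟩; exact h (hiff.mp hc))]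
          · -- tom odd: k = 0, every even j counts
            have htm : PySem.Int.mod tom 2 ≠ 0 :=
              fun h => hte ((PySem.Int.mod_eq_zero_iff_dvd tom 2).mp h)
            have hk0 : k = 0 := by
              by_contra h
              exact hte (dvd_trans (dvd_pow_self 2 h) hk)
            subst hk0
            rw [if_neg (by rintro ⟨-, h⟩; exact htm h), if_pos ⟨htm, hjm⟩]
            rw [if_pos ⟨by simpa using hje, hle⟩]
            simp
        · -- j odd: nothing appended, and 2^(k+1) ∤ j
          have hjm : PySem.Int.mod j 2 ≠ 0 :=
            fun h => hje ((PySem.Int.mod_eq_zero_iff_dvd j 2).mp h)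
          have hnd : ¬ ((2:Int)^(k+1) ∣ j ∧ j ≤ tom) := by
            rintro ⟨h, -⟩
            exact hje (dvd_trans (dvd_pow_self 2 (by omega)) h)
          rw [if_neg (by rintro ⟨h, -⟩; exact hjm h),
              if_neg (by rintro ⟨-, h⟩; exact hjm h), if_neg hnd]
          simp
      rw [key]
      omega
    · have h0 : pvCnt ((2:Int)^(k+1)) tom (f+1) j = 0 := pvCnt_of_gt _ _ (f+1) j (by omega)
      rw [h0]
      simp only [pvOuterA]
      rw [if_neg hle]
      omega

-- the count of multiples of D in [j, n] (D, n, j as naturals), as a difference of floors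
lemma pvCnt_eq_div (n D : Nat) :
    ∀ (f : Nat) (j : Nat), 1 ≤ j → j + f = n + 1 →
    pvCnt ((D:Int)) ((n:Int)) f ((j:Int)) = n / D - (j-1) / D := by
  intro f
  induction f with
  | zero =>
    intro j hj hend
    have : j - 1 = n := by omega
    simp [pvCnt, this]
  | succ f ih =>
    intro j hj hend
    have hstep : pvCnt ((D:Int)) ((n:Int)) (f+1) ((j:Int))
        = (if (D:Int) ∣ (j:Int) ∧ (j:Int) ≤ (n:Int) then 1 else 0)
          + pvCnt ((D:Int)) ((n:Int)) f ((j:Int)+1) := rfl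
    have hcast : ((j:Int)+1) = (((j+1 : Nat)) : Int) := by push_cast; ring
    rw [hstep, hcast, ih (j+1) (by omega) (by omega)]
    have hjn : (j:Int) ≤ (n:Int) := by exact_mod_cast Nat.le_of_lt_succ (by omega)
    have hdvd_iff : ((D:Int) ∣ (j:Int)) ↔ (D ∣ j) := Int.natCast_dvd_natCast
    have hsucc : j / D = (j-1) / D + if D ∣ j then 1 else 0 := by
      have h1 : j = (j - 1) + 1 := by omega
      conv_lhs => rw [h1]
      rw [Nat.succ_div]
      congr 1
      rw [← h1]
    have hmono : j / D ≤ n / D := Nat.div_le_div_right (by omega)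
    by_cases h : D ∣ j
    · rw [if_pos ⟨hdvd_iff.mpr h, hjn⟩]
      rw [if_pos h] at hsucc
      simp only [Nat.add_sub_cancel]
      omega
    · rw [if_neg (by rintro ⟨hc, -⟩; exact h (hdvd_iff.mp hc))]
      rw [if_neg h] at hsucc
      simp only [Nat.add_sub_cancel]
      omega

-- every positive n has an exact 2-adic valuation
lemma pv_exists_val : ∀ n : Nat, 1 ≤ n → ∃ k, 2^k ∣ n ∧ ¬ 2^(k+1) ∣ n := by
  intro n
  induction n using Nat.strong_induction_on with
  | _ n ih =>
    intro hn
    by_cases h2 : 2 ∣ n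
    · obtain ⟨m, rfl⟩ := h2
      obtain ⟨k, hk, hk1⟩ := ih m (by omega) (by omega)
      refine ⟨k+1, ?_, ?_⟩
      · rw [pow_succ']; exact mul_dvd_mul_left 2 hk
      · rw [pow_succ']
        intro h
        exact hk1 ((mul_dvd_mul_iff_left (two_ne_zero)).mp h)
    · exact ⟨0, one_dvd n, by simpa using h2⟩

-- B's loop finds 2^(k+1), the smallest power of two not dividing tom
lemma pvFindD_spec (tom : Int) (k : Nat)
    (hk : (2:Int)^k ∣ tom) (hk1 : ¬ ((2:Int)^(k+1) ∣ tom)) :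
    ∀ (fuel : Nat) (m : Nat), 1 ≤ m → m ≤ k+1 → k+1 ≤ m + fuel →
    pvFindD fuel tom ((2:Int)^m) = (2:Int)^(k+1) := by
  intro fuel
  induction fuel with
  | zero =>
    intro m _ hm2 hm3
    have : m = k+1 := by omega
    rw [this]; rfl
  | succ f ih =>
    intro m hm1 hm2 hm3
    by_cases heq : m = k+1
    · subst heq
      have hne : PySem.Int.mod tom ((2:Int)^(k+1)) ≠ 0 :=
        fun h => hk1 ((PySem.Int.mod_eq_zero_iff_dvd tom _).mp h)
      simp only [pvFindD]
      rw [if_neg hne]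
    · have hmk : m ≤ k := by omega
      have hdvd : (2:Int)^m ∣ tom := dvd_trans (pow_dvd_pow 2 hmk) hk
      have hmod : PySem.Int.mod tom ((2:Int)^m) = 0 :=
        (PySem.Int.mod_eq_zero_iff_dvd tom _).mpr hdvd
      have hmul : (2:Int)^m * 2 = (2:Int)^(m+1) := by rw [pow_succ]
      simp only [pvFindD]
      rw [if_pos hmod, hmul]
      exact ih (m+1) (by omega) (by omega) (by omega)

-- k is small: k < 2^k ≤ n for 2^k ∣ n, 1 ≤ n
lemma pv_val_le (n k : Nat) (hn : 1 ≤ n) (hk : 2^k ∣ n) : k ≤ n := by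
  have h1 : 2^k ≤ n := Nat.le_of_dvd (by omega) hk
  have h2 : k < 2^k := Nat.lt_two_pow_self
  omega

-- ===== VERDICT (by name: the statement is the Claim_ definition above) =====
theorem tom_jerry_spec : Claim_equal_tom_jerry := by
  intro tom _
  unfold Spec_tom_jerry tom_jerry tom_jerry_alt
  by_cases hpos : tom ≤ 0
  · have : tom.toNat = 0 := by omega
    simp [this, hpos, pvOuterA]
  · replace hpos : 0 < tom := by omega
    rw [if_neg (by omega)]
    set n : Nat := tom.toNat with hn
    have htn : tom = (n : Int) := by omega
    have hn1 : 1 ≤ n := by omega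
    obtain ⟨k, hkN, hk1N⟩ := pv_exists_val n hn1
    have hk : (2:Int)^k ∣ tom := by
      rw [htn]
      exact_mod_cast Int.natCast_dvd_natCast.mpr hkN
    have hk1 : ¬ ((2:Int)^(k+1) ∣ tom) := by
      rw [htn]
      intro h
      apply hk1N
      have := Int.natCast_dvd_natCast.mp (by exact_mod_cast h)
      exact this
    have htom1 : 1 ≤ tom := by omega
    -- A's side
    have hA := pvOuterA_len tom k htom1 hk hk1 n 1 [] (by omega)
    have hDpow : ((2:Int)^(k+1)) = (((2^(k+1) : Nat)) : Int) := by push_cast; ring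
    have hcnt : pvCnt ((2:Int)^(k+1)) tom n 1 = n / 2^(k+1) - 0 / 2^(k+1) := by
      have := pvCnt_eq_div n (2^(k+1)) n 1 (by omega) (by omega)
      rw [hDpow, htn]
      simpa using this
    -- B's side
    have hB : pvFindD n tom 2 = (2:Int)^(k+1) := by
      have h2 : ((2:Int)^1) = 2 := pow_one 2
      rw [← h2]
      exact pvFindD_spec tom k hk hk1 n 1 (by omega) (by omega)
        (by have := pv_val_le n k hn1 hkN; omega)
    rw [hB, hA, hcnt]
    rw [PySem.Int.floordiv_eq_ediv_of_pos (by positivity), htn, hDpow]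
    rw [← Int.natCast_div]
    simp
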